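-- pv_equiv track=rewrite | github.com/LiteralGenie/nlp-practice | src/classes/cache.py | is_dict_equal
-- ===== SOURCE A (Python) =====
-- def is_dict_equal(left: dict, right: dict) -> bool:
--     """Shallow dict comparison"""
--
--     # Check keys
--     is_keys_equal = set(left.keys()) == set(right.keys())
--     if not is_keys_equal:
--         return False
--
--     # Check vals
--     for key in left:
--         if left[key] != right[key]:
--             return False
--
--     return True
-- ===== SOURCE B (Python) =====
-- def is_dict_equal(left: dict, right: dict) -> bool:
--     """Shallow dict comparison: canonicalize both dicts by sorting their item
--     lists, then compare the sorted lists."""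
--     return sorted(left.items()) == sorted(right.items())
-- ===== Notes on version B (the rewrite author's own statement) =====
-- stated objective: simpler
-- what changed: Replaced A's set-equality test plus per-key value loop by canonicalization: sort both item lists and compare them with a single list equality.
import Mathlib
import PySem

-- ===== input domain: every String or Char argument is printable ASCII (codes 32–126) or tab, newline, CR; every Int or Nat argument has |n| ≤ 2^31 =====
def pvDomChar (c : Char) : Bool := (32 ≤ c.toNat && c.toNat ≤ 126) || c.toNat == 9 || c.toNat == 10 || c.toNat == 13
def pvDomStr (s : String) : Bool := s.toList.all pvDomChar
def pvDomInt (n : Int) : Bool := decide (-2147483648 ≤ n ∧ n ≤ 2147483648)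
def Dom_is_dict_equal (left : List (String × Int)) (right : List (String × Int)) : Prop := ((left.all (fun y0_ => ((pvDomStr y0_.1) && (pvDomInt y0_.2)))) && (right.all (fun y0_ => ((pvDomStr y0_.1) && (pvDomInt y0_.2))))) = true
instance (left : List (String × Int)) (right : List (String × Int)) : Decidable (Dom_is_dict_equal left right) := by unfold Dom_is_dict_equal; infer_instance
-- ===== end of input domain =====

-- B replaces A's key-set test plus value loop by canonicalization: sort both item lists, compare once; objective: simpler.

-- ===== PORT A =====
-- 'for key in left: if left[key] != right[key]: return False' (keys already known equal as sets)
def pvCheckVals (ks : List String) (l r : PySem.Dict String Int) : Bool :=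
  match ks with
  | [] => true
  | k :: ks => if l.get? k ≠ r.get? k then false else pvCheckVals ks l r

def is_dict_equal (left : List (String × Int)) (right : List (String × Int)) : Bool :=
  let l := PySem.Dict.ofList left
  let r := PySem.Dict.ofList right
  let is_keys_equal := PySem.Set.equal (PySem.Set.ofList l.keys) (PySem.Set.ofList r.keys)
  if !is_keys_equal then false
  else pvCheckVals l.keys l r

-- ===== PORT B =====
-- 'sorted(left.items()) == sorted(right.items())'. Python orders (str, int) tuples
-- lexicographically; a dict's items have pairwise-distinct keys, so the comparison is
-- always decided by the key alone — sorting by the first component is exact here.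
def is_dict_equal_alt (left : List (String × Int)) (right : List (String × Int)) : Bool :=
  let l := PySem.Dict.ofList left
  let r := PySem.Dict.ofList right
  decide (PySem.List.sorted l.items Prod.fst false = PySem.List.sorted r.items Prod.fst false)

-- ===== PRECONDITION & SPEC =====
def Spec_is_dict_equal (left : List (String × Int)) (right : List (String × Int)) (out : Bool) : Prop := out = is_dict_equal_alt left right
instance (left : List (String × Int)) (right : List (String × Int)) (out : Bool) : Decidable (Spec_is_dict_equal left right out) := by unfold Spec_is_dict_equal; infer_instance

-- ===== CLAIM (what is proved, stated in full; the proofs are below) =====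
def Claim_equal_is_dict_equal : Prop := ∀ (left : List (String × Int)) (right : List (String × Int)), Dom_is_dict_equal left right → Spec_is_dict_equal left right (is_dict_equal left right)

-- ===== LEMMAS AND PROOFS =====

theorem pvCheckVals_eq_all (ks : List String) (l r : PySem.Dict String Int) :
    pvCheckVals ks l r = ks.all (fun k => decide (l.get? k = r.get? k)) := by
  induction ks with
  | nil => rfl
  | cons k ks ih => simp [pvCheckVals, ih]

-- sorted item lists coincide exactly when the item lists are permutations (keys nodup)
theorem sorted_eq_iff_perm (xs ys : List (String × Int))
    (hx : (xs.map Prod.fst).Nodup) :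
    (PySem.List.sorted xs Prod.fst false = PySem.List.sorted ys Prod.fst false) ↔ xs.Perm ys := by
  constructor
  · intro h
    have p1 : (PySem.List.sorted xs Prod.fst false).Perm xs := PySem.List.sorted_perm _ _ _
    have p2 : (PySem.List.sorted ys Prod.fst false).Perm ys := PySem.List.sorted_perm _ _ _
    exact p1.symm.trans (h ▸ p2)
  · intro hperm
    have p1 : (PySem.List.sorted xs Prod.fst false).Perm xs := PySem.List.sorted_perm _ _ _
    have hle : (PySem.List.sorted xs Prod.fst false).Pairwise
        (fun a b => Prod.fst a ≤ Prod.fst b) := PySem.List.sorted_pairwise _ _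
    have hnd : ((PySem.List.sorted xs Prod.fst false).map Prod.fst).Nodup := by
      exact ((p1.map Prod.fst).nodup_iff).2 hx
    have hne : (PySem.List.sorted xs Prod.fst false).Pairwise
        (fun a b => Prod.fst a ≠ Prod.fst b) := List.pairwise_map.1 hnd
    have hlt : (PySem.List.sorted xs Prod.fst false).Pairwise
        (fun a b => Prod.fst a < Prod.fst b) := by
      refine (hle.and hne).imp ?_
      rintro a b ⟨h1, h2⟩
      exact lt_of_le_of_ne h1 h2
    exact (PySem.List.sorted_eq_of_perm_of_pairwise_lt ys
      (PySem.List.sorted xs Prod.fst false) Prod.fst (p1.trans hperm) hlt).symm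

theorem items_perm_iff (l r : PySem.Dict String Int)
    (hln : l.keys.Nodup) (hrn : r.keys.Nodup) :
    l.items.Perm r.items ↔
      ((∀ x, x ∈ l.keys ↔ x ∈ r.keys) ∧ ∀ k ∈ l.keys, l.get? k = r.get? k) := by
  constructor
  · intro hperm
    have hmem : ∀ p : String × Int, p ∈ l.items ↔ p ∈ r.items := fun p => hperm.mem_iff
    constructor
    · intro x
      constructor
      · intro hx
        obtain ⟨⟨k, v⟩, hm, hk⟩ := List.mem_map.1 hx
        cases hk
        exact PySem.Dict.mem_keys_of_mem_items r ((hmem _).1 hm)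
      · intro hx
        obtain ⟨⟨k, v⟩, hm, hk⟩ := List.mem_map.1 hx
        cases hk
        exact PySem.Dict.mem_keys_of_mem_items l ((hmem _).2 hm)
    · intro k hk
      obtain ⟨⟨k', v⟩, hm, hk'⟩ := List.mem_map.1 hk
      cases hk'
      rw [PySem.Dict.get?_of_mem_items l hm hln,
          PySem.Dict.get?_of_mem_items r ((hmem _).1 hm) hrn]
  · rintro ⟨hkeys, hvals⟩
    have hndl : l.items.Nodup := List.Nodup.of_map Prod.fst hln
    have hndr : r.items.Nodup := List.Nodup.of_map Prod.fst hrn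
    rw [List.perm_ext_iff_of_nodup hndl hndr]
    rintro ⟨k, v⟩
    constructor
    · intro hm
      have hkl : k ∈ l.keys := PySem.Dict.mem_keys_of_mem_items l hm
      have hg : r.get? k = some v := by
        rw [← hvals k hkl]; exact PySem.Dict.get?_of_mem_items l hm hln
      exact PySem.Dict.mem_items_of_get?_eq_some r hg
    · intro hm
      have hkr : k ∈ r.keys := PySem.Dict.mem_keys_of_mem_items r hm
      have hkl : k ∈ l.keys := (hkeys k).2 hkr
      have hg : l.get? k = some v := by
        rw [hvals k hkl]; exact PySem.Dict.get?_of_mem_items r hm hrn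
      exact PySem.Dict.mem_items_of_get?_eq_some l hg

theorem main_eq (left right : List (String × Int)) :
    is_dict_equal left right = is_dict_equal_alt left right := by
  simp only [is_dict_equal, is_dict_equal_alt]
  set l := PySem.Dict.ofList left
  set r := PySem.Dict.ofList right
  have hln : l.keys.Nodup := PySem.Dict.nodup_keys_ofList left
  have hrn : r.keys.Nodup := PySem.Dict.nodup_keys_ofList right
  have hperm_iff : (PySem.List.sorted l.items Prod.fst false =
      PySem.List.sorted r.items Prod.fst false) ↔ l.items.Perm r.items :=
    sorted_eq_iff_perm _ _ hln
  rw [PySem.Set.ofList_eq_self_of_nodup _ hln, PySem.Set.ofList_eq_self_of_nodup _ hrn]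
  by_cases hkeq : PySem.Set.equal (α := String) l.keys r.keys = true
  · have hk : ∀ x, x ∈ l.keys ↔ x ∈ r.keys := (PySem.Set.equal_iff _ _).1 hkeq
    simp only [hkeq, Bool.not_true, Bool.false_eq_true, if_false]
    rw [← Bool.coe_iff_coe, pvCheckVals_eq_all]
    simp only [List.all_eq_true, decide_eq_true_eq]
    rw [hperm_iff, items_perm_iff l r hln hrn]
    exact ⟨fun hv => ⟨hk, hv⟩, fun h => h.2⟩
  · have hnp : ¬ l.items.Perm r.items := fun hp =>
      hkeq ((PySem.Set.equal_iff _ _).2 ((items_perm_iff l r hln hrn).1 hp).1)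
    simp only [Bool.not_eq_true] at hkeq
    simp [hkeq, hperm_iff, hnp]

-- ===== VERDICT (by name: the statement is the Claim_ definition above) =====
theorem is_dict_equal_spec : Claim_equal_is_dict_equal := by
  intro left right _
  unfold Spec_is_dict_equal
  exact main_eq left right
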